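-- pv_equiv track=rewrite | github.com/MatteoGradinaru-UCLL/coursematerial_2526 | 09-sets/04-assignment-spellcheck/student.py | spellcheck
-- ===== SOURCE A (Python) =====
-- def spellcheck(document, valid_words):
--     valid_set = set(valid_words)
--     words = document.split()
--
--     misspelled = set()
--     for word in words:
--         lowercase_word = word.lower()
--         if lowercase_word not in valid_set:
--             misspelled.add(lowercase_word)
--
--     return misspelled
-- ===== SOURCE B (Python) =====
-- def _contains_sorted(sv, w):
--     lo, hi = 0, len(sv)
--     while lo < hi:
--         mid = (lo + hi) // 2
--         if sv[mid] < w: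
--             lo = mid + 1
--         else:
--             hi = mid
--     return lo < len(sv) and sv[lo] == w
--
--
-- def spellcheck(document, valid_words):
--     sv = sorted(valid_words)
--     result = []
--     for word in document.split():
--         w = word.lower()
--         if not _contains_sorted(sv, w) and w not in result:
--             result.append(w)
--     return set(result)
-- ===== Notes on version B (the rewrite author's own statement) =====
-- stated objective: alternative
-- what changed: Replaces A's hash-set machinery entirely: B sorts the dictionary once and decides each word's validity by hand-written binary search over the sorted list, collecting misspellings in a duplicate-checked list that is turned into a set only at the end.
import Mathlib
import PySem

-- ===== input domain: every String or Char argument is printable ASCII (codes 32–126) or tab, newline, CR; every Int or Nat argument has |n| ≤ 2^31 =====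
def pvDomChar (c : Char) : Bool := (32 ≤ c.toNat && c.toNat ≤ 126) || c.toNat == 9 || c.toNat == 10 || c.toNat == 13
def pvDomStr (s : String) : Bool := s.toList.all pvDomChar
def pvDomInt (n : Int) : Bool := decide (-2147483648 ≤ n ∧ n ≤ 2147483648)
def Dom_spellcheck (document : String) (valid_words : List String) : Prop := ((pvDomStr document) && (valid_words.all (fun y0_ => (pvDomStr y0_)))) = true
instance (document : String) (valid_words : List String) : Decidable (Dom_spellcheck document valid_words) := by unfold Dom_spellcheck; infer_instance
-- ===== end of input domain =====

-- B drops A's hash-set machinery: it sorts the dictionary once, decides each word by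
-- hand-written binary search over the sorted list, and collects misspellings in a
-- duplicate-checked list turned into a set at the end (alternative; same return value).

-- ===== PORT A =====
def spellcheck (document : String) (valid_words : List String) : List String :=
  let valid_set : PySem.Set String := PySem.Set.ofList valid_words
  let words := PySem.Str.split₀ document
  words.foldl
    (fun misspelled word =>
      let lowercase_word := PySem.Str.lower word
      if PySem.Set.contains valid_set lowercase_word then misspelled
      else PySem.Set.add misspelled lowercase_word)
    PySem.Set.empty

-- ===== PORT B =====
-- B-side helper: the hand-written bisect-left loop of Source B's _contains_sorted;
-- the fuel argument (hi - lo bounds the iteration count) only makes the while-loop total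
def bsGo (sv : List String) (w : String) : Nat → Nat → Nat → Nat
  | 0, lo, _ => lo
  | fuel + 1, lo, hi =>
    if lo < hi then
      let mid := (lo + hi) / 2
      if sv.getD mid "" < w then bsGo sv w fuel (mid + 1) hi
      else bsGo sv w fuel lo mid
    else lo

def bsLoop (sv : List String) (w : String) (lo hi : Nat) : Nat :=
  bsGo sv w (hi - lo) lo hi

-- B-side helper: Source B's _contains_sorted (indices stay in range, so getD is exact)
def containsSorted (sv : List String) (w : String) : Bool :=
  let lo := bsLoop sv w 0 sv.length
  decide (lo < sv.length) && (sv.getD lo "" == w)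

def spellcheck_alt (document : String) (valid_words : List String) : List String :=
  let sv := PySem.List.sorted valid_words (fun x => x) false
  let result := (PySem.Str.split₀ document).foldl
    (fun result word =>
      let w := PySem.Str.lower word
      if !containsSorted sv w && !result.contains w then result ++ [w] else result)
    []
  PySem.Set.ofList result

-- ===== PRECONDITION & SPEC =====
def Spec_spellcheck (document : String) (valid_words : List String) (out : List String) : Prop := out = spellcheck_alt document valid_words
instance (document : String) (valid_words : List String) (out : List String) : Decidable (Spec_spellcheck document valid_words out) := by unfold Spec_spellcheck; infer_instance

-- ===== CLAIM (what is proved, stated in full; the proofs are below) =====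
def Claim_equal_spellcheck : Prop := ∀ (document : String) (valid_words : List String), Dom_spellcheck document valid_words → Spec_spellcheck document valid_words (spellcheck document valid_words)

-- ===== LEMMAS AND PROOFS =====

-- a (≤)-pairwise list is monotone in its (in-range) getD entries
theorem sorted_getD_mono (sv : List String)
    (hs : List.Pairwise (fun a b : String => a ≤ b) sv)
    {i j : Nat} (hij : i ≤ j) (hj : j < sv.length) : sv.getD i "" ≤ sv.getD j "" := by
  rcases Nat.lt_or_eq_of_le hij with h | h
  · have hm := (List.pairwise_iff_getElem.mp hs) i j (by omega) hj h
    rw [List.getD_eq_getElem _ _ (by omega : i < sv.length), List.getD_eq_getElem _ _ hj]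
    exact hm
  · subst h; exact le_refl _

-- binary-search invariant: everything left of the result is < w, everything at/right of it is ≥ w
theorem bsGo_inv (sv : List String) (w : String)
    (hs : List.Pairwise (fun a b : String => a ≤ b) sv) (fuel lo hi : Nat) :
    hi - lo ≤ fuel →
    hi ≤ sv.length →
    (∀ i, i < lo → i < sv.length → sv.getD i "" < w) →
    (∀ i, hi ≤ i → i < sv.length → w ≤ sv.getD i "") →
    (∀ i, i < bsGo sv w fuel lo hi → i < sv.length → sv.getD i "" < w) ∧
    (∀ i, bsGo sv w fuel lo hi ≤ i → i < sv.length → w ≤ sv.getD i "") := by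
  fun_induction bsGo sv w fuel lo hi with
  | case1 lo hi =>
      intro hfuel hhi hP hQ
      exact ⟨hP, fun i h1 h2 => hQ i (by omega) h2⟩
  | case2 fuel lo hi h mid hlt ih =>
      intro hfuel hhi hP hQ
      refine ih (by omega) hhi ?_ hQ
      intro i hi1 hi2
      rcases Nat.lt_or_ge i lo with hc | hc
      · exact hP i hc hi2
      · calc sv.getD i "" ≤ sv.getD mid "" := sorted_getD_mono sv hs (by omega) (by omega)
          _ < w := hlt
  | case3 fuel lo hi h mid hge ih =>
      intro hfuel hhi hP hQ
      refine ih (by omega) (by omega) hP ?_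
      intro i hi1 hi2
      calc w ≤ sv.getD mid "" := not_lt.mp hge
        _ ≤ sv.getD i "" := sorted_getD_mono sv hs (by omega) hi2
  | case4 fuel lo hi h =>
      intro hfuel hhi hP hQ
      exact ⟨hP, fun i h1 h2 => hQ i (by omega) h2⟩

theorem bs_inv (sv : List String) (w : String)
    (hs : List.Pairwise (fun a b : String => a ≤ b) sv) (lo hi : Nat) :
    hi ≤ sv.length →
    (∀ i, i < lo → i < sv.length → sv.getD i "" < w) →
    (∀ i, hi ≤ i → i < sv.length → w ≤ sv.getD i "") →
    (∀ i, i < bsLoop sv w lo hi → i < sv.length → sv.getD i "" < w) ∧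
    (∀ i, bsLoop sv w lo hi ≤ i → i < sv.length → w ≤ sv.getD i "") := by
  exact bsGo_inv sv w hs (hi - lo) lo hi (le_refl _)

-- the binary search decides membership on a sorted list
theorem containsSorted_true_iff (sv : List String) (w : String)
    (hs : List.Pairwise (fun a b : String => a ≤ b) sv) :
    containsSorted sv w = true ↔ w ∈ sv := by
  have hinv := bs_inv sv w hs 0 sv.length (le_refl _)
    (fun i h1 _ => absurd h1 (by omega))
    (fun i h1 h2 => absurd h1 (by omega))
  unfold containsSorted
  constructor
  · intro h
    simp only [Bool.and_eq_true, decide_eq_true_eq, beq_iff_eq] at h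
    obtain ⟨h1, h2⟩ := h
    rw [← h2, List.getD_eq_getElem _ _ h1]
    exact List.getElem_mem h1
  · intro hw
    obtain ⟨j, hj, hje⟩ := List.mem_iff_getElem.mp hw
    have hrj : bsLoop sv w 0 sv.length ≤ j := by
      by_contra hc
      have hlt := hinv.1 j (by omega) hj
      rw [List.getD_eq_getElem _ _ hj, hje] at hlt
      exact lt_irrefl _ hlt
    have hrlen : bsLoop sv w 0 sv.length < sv.length := lt_of_le_of_lt hrj hj
    have h1 : w ≤ sv.getD (bsLoop sv w 0 sv.length) "" := hinv.2 _ (le_refl _) hrlen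
    have h2 : sv.getD (bsLoop sv w 0 sv.length) "" ≤ sv.getD j "" :=
      sorted_getD_mono sv hs hrj hj
    rw [List.getD_eq_getElem _ _ hj, hje] at h2
    have heq : sv.getD (bsLoop sv w 0 sv.length) "" = w := le_antisymm h2 h1
    rw [List.getD_eq_getElem _ _ hrlen] at heq
    simp [hrlen, heq]

-- A's set-membership test and B's binary search agree
theorem contains_agree (valid_words : List String) (w : String) :
    PySem.Set.contains (PySem.Set.ofList valid_words) w
      = containsSorted (PySem.List.sorted valid_words (fun x => x) false) w := by
  have hs : List.Pairwise (fun a b : String => a ≤ b)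
      (PySem.List.sorted valid_words (fun x => x) false) :=
    PySem.List.sorted_pairwise valid_words (fun x => x)
  by_cases hw : w ∈ valid_words
  · have h1 : PySem.Set.contains (PySem.Set.ofList valid_words) w = true := by
      simp [PySem.Set.contains, PySem.Set.mem_ofList, hw]
    have h2 : containsSorted (PySem.List.sorted valid_words (fun x => x) false) w = true :=
      (containsSorted_true_iff _ _ hs).mpr
        ((PySem.List.mem_sorted valid_words (fun x => x) false w).mpr hw)
    rw [h1, h2]
  · have h1 : PySem.Set.contains (PySem.Set.ofList valid_words) w = false := by
      simp [PySem.Set.contains, PySem.Set.mem_ofList, hw]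
    have h2 : containsSorted (PySem.List.sorted valid_words (fun x => x) false) w = false := by
      cases hcs : containsSorted (PySem.List.sorted valid_words (fun x => x) false) w
      · rfl
      · exact absurd ((PySem.List.mem_sorted valid_words (fun x => x) false w).mp
          ((containsSorted_true_iff _ _ hs).mp hcs)) hw
    rw [h1, h2]

-- one step of A's loop equals one step of B's loop
theorem step_eq (valid_words : List String) (s : List String) (word : String) :
    (let lowercase_word := PySem.Str.lower word;
     if PySem.Set.contains (PySem.Set.ofList valid_words) lowercase_word then s
     else PySem.Set.add s lowercase_word)
    = (let w := PySem.Str.lower word;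
       if !containsSorted (PySem.List.sorted valid_words (fun x => x) false) w
            && !s.contains w then s ++ [w] else s) := by
  simp only []
  rw [← contains_agree]
  cases hv : PySem.Set.contains (PySem.Set.ofList valid_words) (PySem.Str.lower word)
  · cases hsl : s.contains (PySem.Str.lower word)
    · have hm : PySem.Str.lower word ∉ s := by simpa using hsl
      simp [PySem.Set.add, PySem.Set.contains, hm]
    · have hm : PySem.Str.lower word ∈ s := by simpa using hsl
      simp [PySem.Set.add, PySem.Set.contains, hm]
  · simp

-- B's loop never introduces a duplicate
theorem fold_nodup (sv : List String) (words : List String) (acc : List String)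
    (hacc : acc.Nodup) :
    (words.foldl
      (fun result word =>
        let w := PySem.Str.lower word
        if !containsSorted sv w && !result.contains w then result ++ [w] else result)
      acc).Nodup := by
  induction words generalizing acc with
  | nil => exact hacc
  | cons word t ih =>
      simp only [List.foldl_cons]
      apply ih
      cases hc : (!containsSorted sv (PySem.Str.lower word)
          && !acc.contains (PySem.Str.lower word))
      · simpa [hc] using hacc
      · have hnm : PySem.Str.lower word ∉ acc := by
          simp only [Bool.and_eq_true, Bool.not_eq_true'] at hc
          simpa [List.contains_iff_mem] using hc.2
        have hdisj : ∀ a ∈ acc, a ≠ PySem.Str.lower word := fun a ha hq => hnm (hq ▸ ha)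
        simpa [hc, List.nodup_append, hacc] using hdisj

-- set() of a duplicate-free list is the list itself
theorem foldl_add_eq_append (s acc : List String)
    (h : ∀ x ∈ s, x ∉ acc) (hn : s.Nodup) :
    s.foldl PySem.Set.add acc = acc ++ s := by
  induction s generalizing acc with
  | nil => simp
  | cons a t ih =>
      simp only [List.foldl_cons]
      have hna : a ∉ acc := h a List.mem_cons_self
      have ha : PySem.Set.add acc a = acc ++ [a] := by
        simp [PySem.Set.add, PySem.Set.contains, hna]
      rw [ha, ih (acc ++ [a])
        (fun x hx => by
          simp only [List.mem_append, List.mem_singleton]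
          rintro (hxa | rfl)
          · exact h x (List.mem_cons_of_mem _ hx) hxa
          · exact (List.nodup_cons.mp hn).1 hx)
        (List.nodup_cons.mp hn).2]
      simp

theorem ofList_eq_self (s : List String) (hn : s.Nodup) : PySem.Set.ofList s = s := by
  simpa [PySem.Set.ofList, PySem.Set.empty] using
    foldl_add_eq_append s [] (by simp) hn

-- ===== VERDICT (by name: the statement is the Claim_ definition above) =====
theorem spellcheck_spec : Claim_equal_spellcheck := by
  intro document valid_words _
  show spellcheck document valid_words = spellcheck_alt document valid_words
  unfold spellcheck spellcheck_alt
  simp only []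
  have hfg :
      (fun (misspelled : List String) (word : String) =>
        let lowercase_word := PySem.Str.lower word
        if PySem.Set.contains (PySem.Set.ofList valid_words) lowercase_word then misspelled
        else PySem.Set.add misspelled lowercase_word)
      = (fun (result : List String) (word : String) =>
        let w := PySem.Str.lower word
        if !containsSorted (PySem.List.sorted valid_words (fun x => x) false) w
             && !result.contains w then result ++ [w] else result) := by
    funext s word
    exact step_eq valid_words s word
  rw [hfg,
    ofList_eq_self _
      (fold_nodup (PySem.List.sorted valid_words (fun x => x) false)
        (PySem.Str.split₀ document) [] List.nodup_nil)]
  rfl
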